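-- pv_equiv track=rewrite | github.com/paiml/depyler | examples/hard_combo_binomial.py | binomial_expand
-- ===== SOURCE A (Python) =====
-- def choose(n: int, r: int) -> int:
--     """Binomial coefficient C(n,r)."""
--     if r < 0 or r > n:
--         return 0
--     if r == 0 or r == n:
--         return 1
--     if r > n - r:
--         r = n - r
--     result: int = 1
--     i: int = 0
--     while i < r:
--         result = result * (n - i)
--         result = result // (i + 1)
--         i = i + 1
--     return result
--
-- def int_pow(bv: int, exp: int) -> int:
--     """Integer exponentiation."""
--     result: int = 1
--     i: int = 0
--     while i < exp:
--         result = result * bv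
--         i = i + 1
--     return result
--
-- def binomial_expand(a: int, b: int, n: int) -> int:
--     """Compute (a+b)^n using binomial theorem."""
--     total: int = 0
--     k: int = 0
--     while k <= n:
--         coeff: int = choose(n, k)
--         total = total + coeff * int_pow(a, n - k) * int_pow(b, k)
--         k = k + 1
--     return total
-- ===== SOURCE B (Python) =====
-- def binomial_expand(a: int, b: int, n: int) -> int:
--     """Compute (a+b)^n directly by binary (fast) exponentiation; 0 for n < 0."""
--     if n < 0:
--         return 0
--     result = 1
--     base = a + b
--     e = n
--     while e > 0:
--         if e & 1:
--             result *= base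
--         base *= base
--         e >>= 1
--     return result
-- ===== Notes on version B (the rewrite author's own statement) =====
-- stated objective: faster
-- what changed: Replaced the O(n^2)-iteration binomial-theorem summation (n+1 terms, each with a coefficient loop and two linear power loops) by direct binary exponentiation of (a+b), returning 0 for n < 0 as A does.
import Mathlib
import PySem

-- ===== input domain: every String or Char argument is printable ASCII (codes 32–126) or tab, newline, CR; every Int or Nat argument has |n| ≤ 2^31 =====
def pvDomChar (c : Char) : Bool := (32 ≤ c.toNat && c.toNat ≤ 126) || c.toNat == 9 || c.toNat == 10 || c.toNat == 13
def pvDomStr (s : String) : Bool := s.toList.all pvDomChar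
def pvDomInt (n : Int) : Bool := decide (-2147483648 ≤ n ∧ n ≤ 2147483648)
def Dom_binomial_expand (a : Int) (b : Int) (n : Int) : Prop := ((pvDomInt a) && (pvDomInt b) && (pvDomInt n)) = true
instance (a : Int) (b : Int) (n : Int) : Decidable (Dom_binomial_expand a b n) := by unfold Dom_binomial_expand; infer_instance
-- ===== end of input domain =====

-- B replaces A's O(n^2) binomial-theorem summation by binary exponentiation of (a+b) (objective: faster).

-- ===== PORT A =====
-- `choose`'s while loop; fuel = remaining iterations (r - i), exact since the loop runs r times
def chooseLoopA (n : Int) (result : Int) (i : Int) : Nat → Int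
  | 0 => result
  | f + 1 => chooseLoopA n (PySem.Int.floordiv (result * (n - i)) (i + 1)) (i + 1) f

def chooseA (n : Int) (r : Int) : Int :=
  if r < 0 ∨ r > n then 0
  else if r = 0 ∨ r = n then 1
  else
    chooseLoopA n 1 0 (if r > n - r then n - r else r).toNat

-- `int_pow`'s while loop; fuel = remaining iterations (exp - i)
def intPowLoopA (bv : Int) (result : Int) : Nat → Int
  | 0 => result
  | f + 1 => intPowLoopA bv (result * bv) f

def int_powA (bv : Int) (exp : Int) : Int := intPowLoopA bv 1 exp.toNat

-- `binomial_expand`'s while loop; fuel = remaining iterations (n - k + 1)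
def beLoopA (a b n : Int) (total k : Int) : Nat → Int
  | 0 => total
  | f + 1 => beLoopA a b n (total + chooseA n k * int_powA a (n - k) * int_powA b k) (k + 1) f

def binomial_expand (a : Int) (b : Int) (n : Int) : Int :=
  beLoopA a b n 0 0 (n + 1).toNat

-- ===== PORT B =====
-- Source B's while loop; e ≥ 0 throughout, so e is carried as a Nat (e & 1 = e % 2, e >>= 1 = e / 2, exact on nonnegatives)
def powLoopB (result base : Int) (e : Nat) : Int :=
  if h : e = 0 then result
  else powLoopB (if e % 2 = 1 then result * base else result) (base * base) (e / 2)
termination_by e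
decreasing_by exact Nat.div_lt_self (Nat.pos_of_ne_zero h) one_lt_two

def binomial_expand_alt (a : Int) (b : Int) (n : Int) : Int :=
  if n < 0 then 0 else powLoopB 1 (a + b) n.toNat

-- ===== PRECONDITION & SPEC =====
def Spec_binomial_expand (a : Int) (b : Int) (n : Int) (out : Int) : Prop := out = binomial_expand_alt a b n
instance (a : Int) (b : Int) (n : Int) (out : Int) : Decidable (Spec_binomial_expand a b n out) := by unfold Spec_binomial_expand; infer_instance

-- ===== CLAIM (what is proved, stated in full; the proofs are below) =====
def Claim_equal_binomial_expand : Prop := ∀ (a : Int) (b : Int) (n : Int), Dom_binomial_expand a b n → Spec_binomial_expand a b n (binomial_expand a b n)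

-- ===== LEMMAS AND PROOFS =====

theorem powLoopB_eq (e : Nat) : ∀ (r base : Int), powLoopB r base e = r * base ^ e := by
  induction e using Nat.strong_induction_on with
  | _ e ih =>
    intro r base
    rw [powLoopB]
    by_cases h : e = 0
    · simp [h]
    · have hlt : e / 2 < e := Nat.div_lt_self (Nat.pos_of_ne_zero h) one_lt_two
      rw [dif_neg h, ih _ hlt]
      rcases Nat.mod_two_eq_zero_or_one e with hm | hm
      · rw [if_neg (by omega)]
        conv_rhs => rw [show e = 2 * (e / 2) from by omega]
        rw [pow_mul, sq]
      · rw [if_pos hm]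
        conv_rhs => rw [show e = 2 * (e / 2) + 1 from by omega]
        rw [pow_succ, pow_mul, sq]
        ring

theorem intPowLoopA_eq (f : Nat) : ∀ (bv r : Int), intPowLoopA bv r f = r * bv ^ f := by
  induction f with
  | zero => intro bv r; simp [intPowLoopA]
  | succ f ih => intro bv r; rw [intPowLoopA, ih]; ring

theorem int_powA_eq (bv exp : Int) : int_powA bv exp = bv ^ exp.toNat := by
  rw [int_powA, intPowLoopA_eq]; ring

theorem chooseLoopA_eq (N : Nat) (f : Nat) : ∀ (i : Nat), i + f ≤ N →
    chooseLoopA (N : Int) ((N.choose i : Nat) : Int) (i : Int) f = ((N.choose (i + f) : Nat) : Int) := by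
  induction f with
  | zero => intro i _; simp [chooseLoopA]
  | succ f ih =>
    intro i h
    have hiN : i < N := by omega
    rw [chooseLoopA]
    have hstep : PySem.Int.floordiv (((N.choose i : Nat) : Int) * ((N : Int) - (i : Int))) ((i : Int) + 1)
        = ((N.choose (i + 1) : Nat) : Int) := by
      have hmul : ((N.choose i : Nat) : Int) * ((N : Int) - (i : Int))
          = ((N.choose (i + 1) * (i + 1) : Nat) : Int) := by
        have hnat := Nat.choose_succ_right_eq N i
        have hc : ((N.choose (i + 1) : Nat) : Int) * ((i : Int) + 1)
            = ((N.choose i : Nat) : Int) * ((N : Int) - (i : Int)) := by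
          have hs : (N : Int) - (i : Int) = ((N - i : Nat) : Int) := by
            push_cast [Nat.cast_sub hiN.le]; ring
          rw [hs]; exact_mod_cast hnat
        push_cast
        linarith
      rw [hmul]
      have : ((i : Int) + 1) = ((i + 1 : Nat) : Int) := by push_cast; ring
      rw [this, PySem.Int.floordiv_natCast]
      congr 1
      exact Nat.mul_div_cancel _ (by omega)
    rw [hstep]
    have hcast : (i : Int) + 1 = ((i + 1 : Nat) : Int) := by push_cast; ring
    rw [hcast]
    rw [show i + (f + 1) = i + 1 + f from by omega]
    exact ih (i + 1) (by omega)

theorem chooseA_eq (N K : Nat) (h : K ≤ N) : chooseA (N : Int) (K : Int) = ((N.choose K : Nat) : Int) := by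
  rw [chooseA]
  by_cases h0 : K = 0
  · subst h0; simp
  by_cases hN : K = N
  · subst hN; simp
  have hKN : K < N := lt_of_le_of_ne h hN
  have hc1 : ¬ ((K : Int) < 0 ∨ (K : Int) > (N : Int)) := by
    rintro (hc | hc) <;> omega
  have hc2 : ¬ ((K : Int) = 0 ∨ (K : Int) = (N : Int)) := by
    rintro (hc | hc)
    · exact h0 (by exact_mod_cast hc)
    · exact hN (by exact_mod_cast hc)
  rw [if_neg hc1, if_neg hc2]
  have hsub : (N : Int) - (K : Int) = ((N - K : Nat) : Int) := by push_cast [Nat.cast_sub h]; ring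
  by_cases hgt : (K : Int) > (N : Int) - (K : Int)
  · rw [if_pos hgt, hsub, Int.toNat_natCast]
    have hle : N - K ≤ N := Nat.sub_le _ _
    have := chooseLoopA_eq N (N - K) 0 (by omega)
    simp only [Nat.choose_zero_right, Nat.cast_one, Nat.cast_zero, zero_add] at this ⊢
    rw [this]
    congr 1
    exact Nat.choose_symm h
  · rw [if_neg hgt, Int.toNat_natCast]
    have := chooseLoopA_eq N K 0 (by omega)
    simpa using this

theorem beLoopA_sum (a b n : Int) (f : Nat) : ∀ (total k : Int),
    beLoopA a b n total k f = total + ∑ j ∈ Finset.range f,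
      chooseA n (k + (j : Int)) * int_powA a (n - (k + (j : Int))) * int_powA b (k + (j : Int)) := by
  induction f with
  | zero => intro total k; simp [beLoopA]
  | succ f ih =>
    intro total k
    rw [beLoopA, ih, Finset.sum_range_succ']
    simp only [Nat.cast_zero, add_zero, Nat.cast_add, Nat.cast_one]
    have : ∀ j : Nat, k + 1 + (j : Int) = k + ((j : Int) + 1) := by intro j; ring
    rw [Finset.sum_congr rfl (fun j _ => by rw [this j])]
    ring

theorem binomial_expand_closed (a b n : Int) (hn : 0 ≤ n) :
    binomial_expand a b n = (a + b) ^ n.toNat := by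
  set N := n.toNat with hN
  have hnN : n = (N : Int) := by omega
  have hfuel : (n + 1).toNat = N + 1 := by omega
  rw [binomial_expand, hfuel, beLoopA_sum, zero_add]
  have hterm : ∀ j ∈ Finset.range (N + 1),
      chooseA n (0 + (j : Int)) * int_powA a (n - (0 + (j : Int))) * int_powA b (0 + (j : Int))
      = b ^ j * a ^ (N - j) * ((N.choose j : Nat) : Int) := by
    intro j hj
    have hjN : j ≤ N := by simpa [Nat.lt_succ_iff] using hj
    rw [zero_add, hnN, chooseA_eq N j hjN, int_powA_eq, int_powA_eq]
    have h1 : ((j : Int)).toNat = j := Int.toNat_natCast j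
    have h2 : ((N : Int) - (j : Int)).toNat = N - j := by omega
    rw [h1, h2]
    ring
  rw [Finset.sum_congr rfl hterm]
  have := add_pow b a N
  rw [show a + b = b + a from add_comm a b, this]

-- ===== VERDICT (by name: the statement is the Claim_ definition above) =====
theorem binomial_expand_spec : Claim_equal_binomial_expand := by
  intro a b n _
  unfold Spec_binomial_expand binomial_expand_alt
  by_cases hn : n < 0
  · rw [if_pos hn]
    have : (n + 1).toNat = 0 := by omega
    rw [binomial_expand, this]; rfl
  · rw [if_neg hn, powLoopB_eq, one_mul]
    exact binomial_expand_closed a b n (by omega)
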